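-- pv_equiv track=rewrite | github.com/maedhros1978/BF-interpreter | bf.py | get_end_of_loop
-- ===== SOURCE A (Python) =====
-- def get_end_of_loop(instructions, ip):
--     """ip must be the address of an open square brackets in instructions
--     list. Search for the corresponding closed square bracket"""
--     n_parenthesis = 1
--     index = ip + 1
--     while n_parenthesis != 0:
--         if instructions[index] == ']':
--             n_parenthesis -= 1
--         elif instructions[index] == '[':
--             n_parenthesis += 1
--         index += 1
--     return index
-- ===== SOURCE B (Python) =====
-- def get_end_of_loop(instructions, ip):
--     """ip must be the address of an open square brackets in instructions
--     list. Search for the corresponding closed square bracket"""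
--     def skip(index):
--         # returns the index one past the ']' closing the loop body that
--         # starts at `index`, descending into inner loops recursively
--         while True:
--             c = instructions[index]
--             if c == ']':
--                 return index + 1
--             if c == '[':
--                 index = skip(index + 1)
--             else:
--                 index += 1
--     return skip(ip + 1)
-- ===== Notes on version B (the rewrite author's own statement) =====
-- stated objective: alternative
-- what changed: replaces the flat depth-counter while loop by a recursive-descent scan: a helper walks forward and, on '[', recurses to skip the whole inner loop, resuming at the index the recursion returns; on ']' it returns index+1
import Mathlib
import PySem

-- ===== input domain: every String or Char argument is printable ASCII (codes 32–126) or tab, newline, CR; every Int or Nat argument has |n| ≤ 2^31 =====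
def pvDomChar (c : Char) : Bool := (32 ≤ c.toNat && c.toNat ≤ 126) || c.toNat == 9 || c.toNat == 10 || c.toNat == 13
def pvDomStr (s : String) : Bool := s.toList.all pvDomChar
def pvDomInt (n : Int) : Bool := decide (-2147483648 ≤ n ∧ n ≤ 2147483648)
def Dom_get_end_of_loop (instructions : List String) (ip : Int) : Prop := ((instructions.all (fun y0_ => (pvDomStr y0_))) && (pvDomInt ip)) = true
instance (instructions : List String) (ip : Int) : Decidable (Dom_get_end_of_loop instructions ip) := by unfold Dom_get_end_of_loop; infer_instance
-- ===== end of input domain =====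

-- B is an alternative decomposition (recursive descent instead of a flat depth counter), same cost;
-- equality of return values is proved on Pre_ (exactly where Python A returns; elsewhere A raises IndexError, and so does B).

-- ===== PORT A =====
-- A's while loop: depth counter n, index increments; none = IndexError (Python raises there).
def goA (ins : List String) (n : Int) (index : Int) : Option Int :=
  match h : PySem.List.pyGet? ins index with
  | none => none
  | some c =>
    let n' := if c = "]" then n - 1 else if c = "[" then n + 1 else n
    if n' = 0 then some (index + 1) else goA ins n' (index + 1)
termination_by ((ins.length : Int) - index).toNat
decreasing_by
  have hin : ¬ PySem.List.pyGet? ins index = none := by simp [h]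
  rw [PySem.List.pyGet?_eq_none_iff] at hin
  rw [not_not] at hin
  have := hin.2
  omega

def get_end_of_loop (instructions : List String) (ip : Int) : Int :=
  (goA instructions 1 (ip + 1)).getD 0

-- ===== PORT B =====
-- B's recursive skip; fuel only makes the nested recursion total (none = IndexError or fuel out;
-- the fuel chosen at the call site is proved sufficient whenever A terminates).
def goB (ins : List String) : Nat → Int → Option Int
  | 0, _ => none
  | f + 1, index =>
    match PySem.List.pyGet? ins index with
    | none => none
    | some c =>
      if c = "]" then some (index + 1)
      else if c = "[" then
        match goB ins f (index + 1) with
        | none => none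
        | some j => goB ins f j
      else goB ins f (index + 1)

def get_end_of_loop_alt (instructions : List String) (ip : Int) : Int :=
  (goB instructions (2 * instructions.length + 2 * ip.natAbs + 3) (ip + 1)).getD 0

-- ===== PRECONDITION & SPEC =====
-- segCount ins i c m counts positions t < m (scanning window starting at index i, Python
-- index semantics) whose character equals c.
def segCount (ins : List String) (i : Int) (c : String) : Nat → Nat
  | 0 => 0
  | m + 1 => (if PySem.List.pyGet? ins i = some c then 1 else 0) + segCount ins (i + 1) c m

-- exactly the inputs on which Python A returns: the scan from ip+1 stays in range up to a
-- point where the count of ']' exceeds the count of '[' by one (elsewhere A raises IndexError).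
def Pre_get_end_of_loop (instructions : List String) (ip : Int) : Prop :=
  -(instructions.length : Int) ≤ ip + 1 ∧
  ∃ m : Nat, m ≤ ((instructions.length : Int) - (ip + 1)).toNat ∧
    segCount instructions (ip + 1) "]" m = segCount instructions (ip + 1) "[" m + 1
instance (instructions : List String) (ip : Int) : Decidable (Pre_get_end_of_loop instructions ip) := by
  unfold Pre_get_end_of_loop; infer_instance

def pvWitness_get_end_of_loop : List String × Int := (["[", "]"], 0)

def Spec_get_end_of_loop (instructions : List String) (ip : Int) (out : Int) : Prop := out = get_end_of_loop_alt instructions ip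
instance (instructions : List String) (ip : Int) (out : Int) : Decidable (Spec_get_end_of_loop instructions ip out) := by unfold Spec_get_end_of_loop; infer_instance

-- ===== CLAIM (what is proved, stated in full; the proofs are below) =====
def Claim_equal_get_end_of_loop : Prop := ∀ (instructions : List String) (ip : Int), Dom_get_end_of_loop instructions ip → Pre_get_end_of_loop instructions ip → Spec_get_end_of_loop instructions ip (get_end_of_loop instructions ip)

-- ===== LEMMAS AND PROOFS =====

-- n-fold composition of goB (proof-only helper)
def chainB (ins : List String) (f : Nat) : Nat → Int → Option Int
  | 0, i => some i
  | k + 1, i => (goB ins f i).bind (chainB ins f k)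

theorem pyGet?_some_lt {ins : List String} {i : Int} {c : String}
    (h : PySem.List.pyGet? ins i = some c) : i < (ins.length : Int) := by
  have hin : ¬ PySem.List.pyGet? ins i = none := by simp [h]
  rw [PySem.List.pyGet?_eq_none_iff, not_not] at hin
  exact hin.2

theorem goB_mono {ins : List String} : ∀ {f : Nat} {i r : Int},
    goB ins f i = some r → goB ins (f + 1) i = some r := by
  intro f
  induction f with
  | zero => intro i r h; simp [goB] at h
  | succ f ih =>
    intro i r h
    rw [goB] at h ⊢
    cases hg : PySem.List.pyGet? ins i with
    | none => rw [hg] at h; exact absurd h (by simp)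
    | some c =>
      rw [hg] at h
      dsimp only at h ⊢
      by_cases h1 : c = "]"
      · simpa [h1] using h
      · by_cases h2 : c = "["
        · simp only [h2, if_true] at h ⊢
          cases hb : goB ins f (i + 1) with
          | none => rw [hb] at h; exact absurd h (by simp)
          | some j =>
            rw [hb] at h
            rw [ih hb]
            exact ih h
        · simp only [h1, h2, if_false] at h ⊢
          exact ih h

theorem goB_mono_le {ins : List String} {f g : Nat} {i r : Int}
    (hfg : f ≤ g) (h : goB ins f i = some r) : goB ins g i = some r := by
  induction g with
  | zero =>
    have : f = 0 := by omega
    rwa [this] at h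
  | succ g ih =>
    rcases Nat.lt_or_ge f (g + 1) with hlt | hge
    · exact goB_mono (ih (by omega))
    · have : f = g + 1 := by omega
      rwa [this] at h

theorem chainB_mono {ins : List String} {f : Nat} : ∀ {k : Nat} {i r : Int},
    chainB ins f k i = some r → chainB ins (f + 1) k i = some r := by
  intro k
  induction k with
  | zero => intro i r h; simpa [chainB] using h
  | succ k ih =>
    intro i r h
    rw [chainB] at h ⊢
    cases hb : goB ins f i with
    | none => rw [hb] at h; exact absurd h (by simp)
    | some j =>
      rw [hb] at h
      rw [goB_mono hb]
      exact ih h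

-- A ⇒ B: if A's loop with n open brackets returns r, n chained descents (with bounded fuel) return r.
theorem goA_to_chainB {ins : List String} : ∀ (k : Nat) (i n r : Int),
    ((ins.length : Int) - i).toNat ≤ k → 1 ≤ n → goA ins n i = some r →
    ∃ f, f ≤ 2 * ((ins.length : Int) - i).toNat + n.toNat ∧ chainB ins f n.toNat i = some r := by
  intro k
  induction k with
  | zero =>
    intro i n r hk hn h
    rw [goA] at h
    cases hg : PySem.List.pyGet? ins i with
    | none => rw [hg] at h; exact absurd h (by simp)
    | some c =>
      have := pyGet?_some_lt hg
      omega
  | succ k ih =>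
    intro i n r hk hn h
    rw [goA] at h
    cases hg : PySem.List.pyGet? ins i with
    | none => rw [hg] at h; exact absurd h (by simp)
    | some c =>
      rw [hg] at h
      dsimp only at h
      have hlt := pyGet?_some_lt hg
      have hk' : ((ins.length : Int) - (i + 1)).toNat ≤ k := by omega
      by_cases h1 : c = "]"
      · have hc : (if c = "]" then n - 1 else if c = "[" then n + 1 else n) = n - 1 := by
          simp [h1]
        rw [hc] at h
        by_cases hone : n - 1 = 0
        · rw [if_pos hone] at h
          obtain rfl : r = i + 1 := (Option.some_inj.mp h).symm
          refine ⟨1, by omega, ?_⟩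
          have hgb : goB ins 1 i = some (i + 1) := by
            rw [goB, hg]; dsimp only; rw [if_pos h1]
          have hn1 : n.toNat = 1 := by omega
          rw [hn1]
          show (goB ins 1 i).bind (chainB ins 1 0) = some (i + 1)
          rw [hgb]
          rfl
        · rw [if_neg hone] at h
          obtain ⟨f, hf, hc2⟩ := ih (i + 1) (n - 1) r hk' (by omega) h
          refine ⟨f + 1, by omega, ?_⟩
          have hgb : goB ins (f + 1) i = some (i + 1) := by
            rw [goB, hg]; dsimp only; rw [if_pos h1]
          have hn2 : n.toNat = (n - 1).toNat + 1 := by omega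
          rw [hn2, chainB, hgb]
          simpa using chainB_mono hc2
      · by_cases h2 : c = "["
        · have hc : (if c = "]" then n - 1 else if c = "[" then n + 1 else n) = n + 1 := by
            rw [if_neg h1, if_pos h2]
          rw [hc, if_neg (by omega : ¬ n + 1 = 0)] at h
          obtain ⟨f, hf, hc2⟩ := ih (i + 1) (n + 1) r hk' (by omega) h
          have hn3 : (n + 1).toNat = n.toNat + 1 := by omega
          rw [hn3, chainB] at hc2
          cases hb : goB ins f (i + 1) with
          | none => rw [hb] at hc2; exact absurd hc2 (by simp)
          | some j1 =>
            rw [hb] at hc2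
            simp only [Option.bind_some] at hc2
            have hn4 : n.toNat = (n.toNat - 1) + 1 := by omega
            rw [hn4, chainB] at hc2
            cases hb2 : goB ins f j1 with
            | none => rw [hb2] at hc2; exact absurd hc2 (by simp)
            | some j2 =>
              rw [hb2] at hc2
              simp only [Option.bind_some] at hc2
              refine ⟨f + 1, by omega, ?_⟩
              have hgb : goB ins (f + 1) i = some j2 := by
                rw [goB, hg]; dsimp only; rw [if_neg h1, if_pos h2, hb]; exact hb2
              rw [hn4, chainB, hgb]
              simpa using chainB_mono hc2
        · have hc : (if c = "]" then n - 1 else if c = "[" then n + 1 else n) = n := by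
            simp [h1, h2]
          rw [hc, if_neg (by omega : ¬ n = 0)] at h
          obtain ⟨f, hf, hc2⟩ := ih (i + 1) n r hk' hn h
          have hn4 : n.toNat = (n.toNat - 1) + 1 := by omega
          rw [hn4, chainB] at hc2
          cases hb : goB ins f (i + 1) with
          | none => rw [hb] at hc2; exact absurd hc2 (by simp)
          | some j1 =>
            rw [hb] at hc2
            simp only [Option.bind_some] at hc2
            refine ⟨f + 1, by omega, ?_⟩
            have hgb : goB ins (f + 1) i = some j1 := by
              rw [goB, hg]; dsimp only; rw [if_neg h1, if_neg h2]; exact hb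
            rw [hn4, chainB, hgb]
            simpa using chainB_mono hc2

-- Pre_ ⇒ A terminates: a window whose ']' count exceeds its '[' count by n lets
-- A's loop with n open brackets reach depth 0 before leaving the index range.
theorem pre_to_goA {ins : List String} : ∀ (k : Nat) (i n : Int) (m : Nat),
    ((ins.length : Int) - i).toNat ≤ k → -(ins.length : Int) ≤ i → 1 ≤ n →
    m ≤ ((ins.length : Int) - i).toNat →
    (segCount ins i "]" m : Int) = segCount ins i "[" m + n →
    ∃ r, goA ins n i = some r := by
  intro k
  induction k with
  | zero =>
    intro i n m hk hlo hn hm hbal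
    have hm0 : m = 0 := by omega
    rw [hm0] at hbal
    simp [segCount] at hbal
    omega
  | succ k ih =>
    intro i n m hk hlo hn hm hbal
    cases m with
    | zero => simp [segCount] at hbal; omega
    | succ m' =>
      have hilt : i < (ins.length : Int) := by omega
      cases hg : PySem.List.pyGet? ins i with
      | none =>
        rw [PySem.List.pyGet?_eq_none_iff] at hg
        exact absurd ⟨hlo, hilt⟩ hg
      | some c =>
        rw [segCount, segCount, hg] at hbal
        have hk' : ((ins.length : Int) - (i + 1)).toNat ≤ k := by omega
        have hm' : m' ≤ ((ins.length : Int) - (i + 1)).toNat := by omega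
        by_cases h1 : c = "]"
        · rw [if_pos (by rw [h1]), if_neg (by rw [h1]; decide)] at hbal
          push_cast at hbal
          by_cases hone : n - 1 = 0
          · refine ⟨i + 1, ?_⟩
            rw [goA, hg]
            dsimp only
            have hc : (if c = "]" then n - 1 else if c = "[" then n + 1 else n) = n - 1 := by
              simp [h1]
            rw [hc, if_pos hone]
          · obtain ⟨r, hr⟩ := ih (i + 1) (n - 1) m' hk' (by omega) (by omega) hm' (by omega)
            refine ⟨r, ?_⟩
            rw [goA, hg]
            dsimp only
            have hc : (if c = "]" then n - 1 else if c = "[" then n + 1 else n) = n - 1 := by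
              simp [h1]
            rw [hc, if_neg hone]
            exact hr
        · by_cases h2 : c = "["
          · rw [if_neg (by rw [h2]; decide), if_pos (by rw [h2])] at hbal
            push_cast at hbal
            obtain ⟨r, hr⟩ := ih (i + 1) (n + 1) m' hk' (by omega) (by omega) hm' (by omega)
            refine ⟨r, ?_⟩
            rw [goA, hg]
            dsimp only
            have hc : (if c = "]" then n - 1 else if c = "[" then n + 1 else n) = n + 1 := by
              simp [h2]
            rw [hc, if_neg (by omega : ¬ n + 1 = 0)]
            exact hr
          · rw [if_neg (by simp; intro hx; exact h1 hx),
                if_neg (by simp; intro hx; exact h2 hx)] at hbal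
            push_cast at hbal
            obtain ⟨r, hr⟩ := ih (i + 1) n m' hk' (by omega) hn hm' (by omega)
            refine ⟨r, ?_⟩
            rw [goA, hg]
            dsimp only
            have hc : (if c = "]" then n - 1 else if c = "[" then n + 1 else n) = n := by
              rw [if_neg h1, if_neg h2]
            rw [hc, if_neg (by omega : ¬ n = 0)]
            exact hr

-- ===== VERDICT (by name: the statement is the Claim_ definition above) =====
theorem get_end_of_loop_spec : Claim_equal_get_end_of_loop := by
  intro ins ip _ hPre
  unfold Spec_get_end_of_loop
  rw [get_end_of_loop, get_end_of_loop_alt]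
  obtain ⟨hlo, m, hm, hbal⟩ := hPre
  obtain ⟨r, h⟩ := pre_to_goA (((ins.length : Int) - (ip + 1)).toNat) (ip + 1) 1 m le_rfl hlo
    le_rfl hm (by omega)
  rw [h]
  obtain ⟨f, hf, hc⟩ :=
    goA_to_chainB (ins := ins) (((ins.length : Int) - (ip + 1)).toNat) (ip + 1) 1 r le_rfl
      le_rfl h
  have h1t : (1 : Int).toNat = 1 := rfl
  rw [h1t] at hc hf
  have hb : goB ins f (ip + 1) = some r := by
    have e : chainB ins f 1 (ip + 1) = (goB ins f (ip + 1)).bind (chainB ins f 0) := rfl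
    rw [e] at hc
    cases hbb : goB ins f (ip + 1) with
    | none => rw [hbb] at hc; exact absurd hc (by simp)
    | some j => rw [hbb] at hc; simpa [chainB] using hc
  have hF : goB ins (2 * ins.length + 2 * ip.natAbs + 3) (ip + 1) = some r :=
    goB_mono_le (by omega) hb
  rw [hF]
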